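-- pv_equiv track=rewrite | github.com/libxsmm/libxsmm | scripts/libxsmm_utilities.py | upper_list
-- ===== SOURCE A (Python) =====
-- def upper_list(lists, level):
--     nlist = len(lists)
--     upper = [level, level + nlist][1 > level] - 1
--     above = lists[upper]
--     if above:
--         return above
--     elif -nlist <= level:
--         return upper_list(lists, level - 1)
--     else:
--         return []
-- ===== SOURCE B (Python) =====
-- def upper_list(lists, level):
--     n = len(lists)
--     stop = level if level < -n - 1 else -n - 1
--     for lv in range(level, stop - 1, -1):
--         above = lists[(lv + n if lv < 1 else lv) - 1]
--         if above:
--             return above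
--     return []
-- ===== Notes on version B (the rewrite author's own statement) =====
-- stated objective: simpler
-- what changed: A's self-recursion (decrement level, early return) is replaced by a single for-loop over the explicit descending range of levels, with the loop bound min(level, -n-1) computed once up front instead of re-checked via a recursive call.
import Mathlib
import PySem

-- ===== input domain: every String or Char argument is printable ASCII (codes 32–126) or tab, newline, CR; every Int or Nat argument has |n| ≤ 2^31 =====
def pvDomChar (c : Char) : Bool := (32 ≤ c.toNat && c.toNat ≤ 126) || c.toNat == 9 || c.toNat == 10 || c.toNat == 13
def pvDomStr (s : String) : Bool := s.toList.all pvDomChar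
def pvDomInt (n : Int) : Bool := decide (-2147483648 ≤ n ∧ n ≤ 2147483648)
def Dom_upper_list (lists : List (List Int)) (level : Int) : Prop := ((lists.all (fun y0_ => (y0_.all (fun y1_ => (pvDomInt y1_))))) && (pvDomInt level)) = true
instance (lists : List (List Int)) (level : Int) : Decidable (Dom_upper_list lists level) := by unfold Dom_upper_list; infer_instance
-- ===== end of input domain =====

-- B replaces A's self-recursion by a single for-loop over the explicit descending
-- range of levels (objective: simpler/iterative decomposition; same cost).

-- ===== PORT A =====
-- A's locals nlist/upper are inlined; 'lists[upper]' is pyGet?; none = IndexError,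
-- excluded by Pre_upper_list (the port returns [] there).
def upper_list (lists : List (List Int)) (level : Int) : List Int :=
  match PySem.List.pyGet? lists ((if 1 > level then level + (lists.length : Int) else level) - 1) with
  | none => []
  | some above =>
    if above ≠ [] then above
    else if _h : -(lists.length : Int) ≤ level then upper_list lists (level - 1)
    else []
termination_by (level + lists.length + 1).toNat
decreasing_by omega

-- ===== PORT B =====
-- the body of B's for-loop, recursing over the remaining levels; none = IndexError
def altLoop (lists : List (List Int)) (n : Int) : List Int → List Int
  | [] => []
  | lv :: rest =>
    match PySem.List.pyGet? lists ((if lv < 1 then lv + n else lv) - 1) with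
    | none => []
    | some above => if above ≠ [] then above else altLoop lists n rest

def upper_list_alt (lists : List (List Int)) (level : Int) : List Int :=
  let n : Int := lists.length
  let stop : Int := if level < -n - 1 then level else -n - 1
  altLoop lists n (PySem.List.pyRange level (stop - 1) (-1))

-- ===== PRECONDITION & SPEC =====
-- Exactly the inputs on which Python A returns (everywhere else it raises IndexError):
-- with n = len(lists), either n ≥ 2 and 1-2n ≤ level ≤ n, or n = 1 with -1 ≤ level ≤ 1
-- and a nonempty single list.
def Pre_upper_list (lists : List (List Int)) (level : Int) : Prop :=
  ((lists.length : Int) ≥ 2 ∧ 1 - 2 * (lists.length : Int) ≤ level ∧ level ≤ (lists.length : Int)) ∨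
  (lists.length = 1 ∧ -1 ≤ level ∧ level ≤ 1 ∧ lists.head? ≠ some [])
instance (lists : List (List Int)) (level : Int) : Decidable (Pre_upper_list lists level) := by
  unfold Pre_upper_list; infer_instance

def pvWitness_upper_list : List (List Int) × Int := ([[], [7]], 2)

def Spec_upper_list (lists : List (List Int)) (level : Int) (out : List Int) : Prop := out = upper_list_alt lists level
instance (lists : List (List Int)) (level : Int) (out : List Int) : Decidable (Spec_upper_list lists level out) := by unfold Spec_upper_list; infer_instance

-- ===== CLAIM (what is proved, stated in full; the proofs are below) =====
def Claim_equal_upper_list : Prop := ∀ (lists : List (List Int)) (level : Int), Dom_upper_list lists level → Pre_upper_list lists level → Spec_upper_list lists level (upper_list lists level)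

-- ===== LEMMAS AND PROOFS =====

-- One unfolding of A's recursion at levels ≥ -n-1 matches one step of B's loop;
-- induction on how far level sits above the floor -n-1.
lemma key_above (lists : List (List Int)) (k : Nat) :
    upper_list lists (-(lists.length : Int) - 1 + k) =
      altLoop lists lists.length
        (PySem.List.pyRange (-(lists.length : Int) - 1 + k) (-(lists.length : Int) - 2) (-1)) := by
  induction k with
  | zero =>
    rw [PySem.List.pyRange_neg_one_cons (by omega), PySem.List.pyRange_neg_one_eq_nil (by omega)]
    rw [upper_list]
    simp only [altLoop]
    have hc : ((-(lists.length : Int) - 1 + (0:Nat)) < 1) = (1 > (-(lists.length : Int) - 1 + (0:Nat))) := by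
      simp [GT.gt]
    cases hget : PySem.List.pyGet? lists ((if 1 > (-(lists.length : Int) - 1 + (0:Nat)) then (-(lists.length : Int) - 1 + (0:Nat)) + (lists.length : Int) else (-(lists.length : Int) - 1 + (0:Nat))) - 1) with
    | none => simp_all [GT.gt]
    | some above =>
      by_cases hne : above = [] <;> simp_all [GT.gt]
  | succ k ih =>
    rw [PySem.List.pyRange_neg_one_cons (by push_cast; omega)]
    rw [upper_list]
    simp only [altLoop]
    cases hget : PySem.List.pyGet? lists ((if 1 > (-(lists.length : Int) - 1 + ((k:Nat)+1 : Nat)) then (-(lists.length : Int) - 1 + ((k:Nat)+1 : Nat)) + (lists.length : Int) else (-(lists.length : Int) - 1 + ((k:Nat)+1 : Nat))) - 1) with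
    | none => simp_all [GT.gt]
    | some above =>
      by_cases hne : above = []
      · have harith : (-(lists.length : Int) - 1 + ((k:Nat)+1 : Nat)) - 1 = -(lists.length : Int) - 1 + (k : Nat) := by push_cast; omega
        have hrec : -(lists.length : Int) ≤ (-(lists.length : Int) - 1 + ((k:Nat)+1 : Nat)) := by push_cast; omega
        simp_all [GT.gt]
      · simp_all [GT.gt]

-- The ports agree on every input (on the raising inputs outside Pre_ both return []).
lemma ports_agree (lists : List (List Int)) (level : Int) :
    upper_list lists level = upper_list_alt lists level := by
  unfold upper_list_alt
  by_cases hlo : level < -(lists.length : Int) - 1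
  · -- below the floor: a single probe on both sides
    simp only [if_pos hlo]
    rw [PySem.List.pyRange_neg_one_cons (by omega), PySem.List.pyRange_neg_one_eq_nil (by omega)]
    rw [upper_list]
    simp only [altLoop]
    cases hget : PySem.List.pyGet? lists ((if 1 > level then level + (lists.length : Int) else level) - 1) with
    | none => simp_all [GT.gt]
    | some above =>
      by_cases hne : above = [] <;> simp_all [GT.gt]; omega
  · -- level ≥ -n-1: write level = -n-1+k and use the induction lemma
    simp only [if_neg hlo]
    obtain ⟨k, hk⟩ : ∃ k : Nat, level = -(lists.length : Int) - 1 + k :=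
      ⟨(level + lists.length + 1).toNat, by omega⟩
    subst hk
    have h2 : -(lists.length : Int) - 1 - 1 = -(lists.length : Int) - 2 := by ring
    rw [h2]
    exact key_above lists k

-- ===== VERDICT (by name: the statement is the Claim_ definition above) =====
theorem upper_list_spec : Claim_equal_upper_list := by
  intro lists level _ _
  exact ports_agree lists level
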